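-- pv_equiv track=rewrite | github.com/GGSimmons1992/CodewarsPython | simpleTriangle.py | solve
-- ===== SOURCE A (Python) =====
-- def solve(n):
--     preRow=[1]
--     for row in range(0,n-1):
--         newRowLen=(len(preRow)+1)
--         newRow=[0]*(len(preRow)+1)
--         newRow[0]=1
--         for x in range(1,newRowLen):
--             if x!=(newRowLen-1):
--                 newRow[x]=preRow[x]+newRow[x-1]
--             else:
--                 newRow[x]=newRow[x-1]
--         preRow=newRow
--     return sum(newRow)
-- ===== SOURCE B (Python) =====
-- def solve(n):
--     # Catalan number C(2n, n) // (n + 1) via the multiplicative binomial formula.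
--     b = 1
--     for k in range(1, n + 1):
--         b = b * (n + k) // k
--     return b // (n + 1)
-- ===== Notes on version B (the rewrite author's own statement) =====
-- stated objective: faster
-- what changed: A builds the whole Catalan/ballot triangle row by row and sums the last row; B returns the same value (the n-th Catalan number) directly as C(2n,n)//(n+1), computing the binomial with the exact multiplicative one-pass formula.
-- outside the precondition, e.g. on solve(1): A raises UnboundLocalError, B returns 1; on solve(0): A raises UnboundLocalError, B returns 1
import Mathlib
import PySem

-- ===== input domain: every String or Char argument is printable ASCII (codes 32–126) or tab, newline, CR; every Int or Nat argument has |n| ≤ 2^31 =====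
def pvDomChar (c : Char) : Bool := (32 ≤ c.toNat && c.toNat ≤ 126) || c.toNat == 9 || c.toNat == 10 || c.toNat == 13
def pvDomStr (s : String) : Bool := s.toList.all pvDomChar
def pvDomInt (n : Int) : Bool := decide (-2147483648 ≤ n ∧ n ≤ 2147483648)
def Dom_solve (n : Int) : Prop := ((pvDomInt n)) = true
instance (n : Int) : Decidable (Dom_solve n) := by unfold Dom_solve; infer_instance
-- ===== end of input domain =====

-- B replaces A's row-by-row Catalan-triangle construction (sum of the last row) by the
-- direct multiplicative binomial formula C(2n,n)//(n+1); measured faster (asymptotic).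

-- ===== PORT A =====
-- body of A's outer 'for row in range(0, n-1)' loop
def solveStep (preRow : List Int) : List Int :=
  let newRowLen : Int := (preRow.length : Int) + 1
  let newRow : List Int := (List.replicate (preRow.length + 1) 0).set 0 1   -- [0]*(len+1); newRow[0]=1
  (PySem.List.pyRange 1 newRowLen).foldl (fun newRow x =>
    if x ≠ newRowLen - 1 then
      newRow.set x.toNat ((PySem.List.pyGet? preRow x).getD 0 + (PySem.List.pyGet? newRow (x - 1)).getD 0)
    else
      newRow.set x.toNat ((PySem.List.pyGet? newRow (x - 1)).getD 0)) newRow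

-- for n ≥ 2 (Pre_) the final preRow is the newRow of the last iteration, so sum(newRow) = its sum
def solve (n : Int) : Int :=
  ((PySem.List.pyRange 0 (n - 1)).foldl (fun preRow _row => solveStep preRow) [1]).sum

-- ===== PORT B =====
def solve_alt (n : Int) : Int :=
  let b : Int := (PySem.List.pyRange 1 (n + 1)).foldl
    (fun b k => PySem.Int.floordiv (b * (n + k)) k) 1
  PySem.Int.floordiv b (n + 1)

-- ===== PRECONDITION & SPEC =====
-- Pre_ excludes n ≤ 1, where A raises UnboundLocalError ('newRow' unset: the loop body never runs)
def Pre_solve (n : Int) : Prop := 2 ≤ n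
instance (n : Int) : Decidable (Pre_solve n) := by unfold Pre_solve; infer_instance
def pvWitness_solve : Int := (5)

def Spec_solve (n : Int) (out : Int) : Prop := out = solve_alt n
instance (n : Int) (out : Int) : Decidable (Spec_solve n out) := by unfold Spec_solve; infer_instance

-- ===== CLAIM (what is proved, stated in full; the proofs are below) =====
def Claim_equal_solve : Prop := ∀ (n : Int), Dom_solve n → Pre_solve n → Spec_solve n (solve n)

-- ===== LEMMAS AND PROOFS =====

-- entries of the triangle A's rows consist of (ballot numbers), as integers
def bal (r x : ℕ) : ℤ :=
  (Nat.choose (r + x) x : ℤ) - (if x = 0 then 0 else (Nat.choose (r + x) (x - 1) : ℤ))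

-- the row A's preRow holds after r ≥ 1 iterations of the outer loop
def rowI (r : ℕ) : List Int := ((List.range r).map (bal r)) ++ [bal r (r - 1)]

-- prefix sums of a list
def pfx (p : List Int) (i : ℕ) : Int := (p.take (i + 1)).sum

theorem bal_rec (r x : ℕ) : bal (r + 1) (x + 1) = bal (r + 1) x + bal r (x + 1) := by
  cases x with
  | zero => simp [bal, Nat.choose_one_right]; ring
  | succ t =>
    have hp1 : (((r+t+2+1).choose (t+1+1) : ℕ) : ℤ) = (r+t+2).choose (t+1) + (r+t+2).choose (t+1+1) := by
      exact_mod_cast Nat.choose_succ_succ (r+t+2) (t+1)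
    have hp2 : (((r+t+2+1).choose (t+1) : ℕ) : ℤ) = (r+t+2).choose t + (r+t+2).choose (t+1) := by
      exact_mod_cast Nat.choose_succ_succ (r+t+2) t
    simp only [bal, Nat.succ_ne_zero, Nat.add_sub_cancel, reduceIte]
    have e1 : r+1+(t+1+1) = r+t+2+1 := by ring
    have e2 : r+1+(t+1) = r+t+2 := by ring
    have e3 : r+(t+1+1) = r+t+2 := by ring
    rw [e1, e2, e3]
    linarith [hp1, hp2]

theorem bal_dup (s : ℕ) : bal (s + 1) (s + 1) = bal (s + 1) s := by
  cases s with
  | zero => simp [bal]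
  | succ t =>
    have hp1 : (((2*t+3+1).choose (t+1+1) : ℕ) : ℤ) = (2*t+3).choose (t+1) + (2*t+3).choose (t+1+1) := by
      exact_mod_cast Nat.choose_succ_succ (2*t+3) (t+1)
    have hp2 : (((2*t+3+1).choose (t+1) : ℕ) : ℤ) = (2*t+3).choose t + (2*t+3).choose (t+1) := by
      exact_mod_cast Nat.choose_succ_succ (2*t+3) t
    have hs : (2*t+3).choose (t+1+1) = (2*t+3).choose (t+1) := by
      have h := Nat.choose_symm (n := 2*t+3) (k := t+2) (by omega)
      have e : 2*t+3 - (t+2) = t+1 := by omega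
      rw [e] at h
      exact h.symm
    simp only [bal, Nat.succ_ne_zero, Nat.add_sub_cancel, reduceIte]
    have e1 : t+1+1+(t+1+1) = 2*t+3+1 := by ring
    have e2 : t+1+1+(t+1) = 2*t+3 := by ring
    rw [e1, e2]
    rw [hp1, hp2]
    have hs' : (((2*t+3).choose (t+1+1) : ℕ) : ℤ) = (2*t+3).choose (t+1) := by exact_mod_cast hs
    linarith [hs']

theorem sum_range_bal (r i : ℕ) :
    (((List.range (i + 1)).map (bal r)).sum : ℤ) = bal (r + 1) i := by
  induction i with
  | zero => simp [bal]
  | succ i ih => rw [List.range_succ, List.map_append, List.sum_append, ih]; simp [bal_rec]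

theorem rowI_sum (s : ℕ) : (rowI (s + 1)).sum = bal (s + 2) (s + 1) := by
  rw [rowI]
  simp only [Nat.add_sub_cancel]
  rw [List.sum_append, sum_range_bal]
  rw [show s + 2 = (s+1)+1 from rfl, bal_rec]
  simp [bal_dup]

theorem bal_eq_catalan (s : ℕ) : bal (s + 2) (s + 1) = (catalan (s + 2) : Int) := by
  have h3 : (2*s+3).choose (s+1) * (s+1) = (2*s+3).choose s * (s+3) := by
    have := Nat.choose_succ_right_eq (2*s+3) s
    have e : 2*s+3 - s = s+3 := by omega
    rw [e] at this; exact this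
  have hsymm : (2*s+3).choose (s+2) = (2*s+3).choose (s+1) := by
    have h := Nat.choose_symm (n := 2*s+3) (k := s+2) (by omega)
    have e : 2*s+3 - (s+2) = s+1 := by omega
    rw [e] at h; exact h.symm
  have hcb : Nat.centralBinom (s+2) = 2 * (2*s+3).choose (s+1) := by
    rw [Nat.centralBinom]
    rw [show 2*(s+2) = (2*s+3)+1 from by ring, show s+2 = (s+1)+1 from rfl]
    rw [Nat.choose_succ_succ, hsymm]; ring
  have hcat : (s+3) * catalan (s+2) = 2 * (2*s+3).choose (s+1) := by
    rw [← hcb]; exact succ_mul_catalan_eq_centralBinom (s+2)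
  have h3' : ((2*s+3).choose (s+1) : ℤ) * (↑s+1) = ((2*s+3).choose s : ℤ) * (↑s+3) := by
    exact_mod_cast h3
  have hcat' : ((s:ℤ)+3) * (catalan (s+2) : ℤ) = 2 * ((2*s+3).choose (s+1) : ℤ) := by
    exact_mod_cast hcat
  rw [bal]
  simp only [Nat.succ_ne_zero, reduceIte, Nat.add_sub_cancel]
  rw [show (s+2)+(s+1) = 2*s+3 from by ring]
  have h0 : ((s:ℤ)+3) ≠ 0 := by positivity
  apply mul_left_cancel₀ h0
  linear_combination h3' - hcat'

theorem pfx_succ (p : List Int) (i : ℕ) (h : i + 1 < p.length) :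
    pfx p (i + 1) = pfx p i + p.getD (i + 1) 0 := by
  rw [pfx, pfx, List.take_add_one, List.sum_append]
  rw [List.getElem?_eq_getElem h]
  simp [List.getD, List.getElem?_eq_getElem h]

theorem inner_inv (p : List Int) (h0 : p.getD 0 0 = 1) (j : ℕ) (hj : j + 1 ≤ p.length) :
    (PySem.List.pyRange 1 ((j : Int) + 1)).foldl
      (fun newRow x =>
        if x ≠ ((p.length : Int) + 1) - 1 then
          newRow.set x.toNat ((PySem.List.pyGet? p x).getD 0 + (PySem.List.pyGet? newRow (x - 1)).getD 0)
        else
          newRow.set x.toNat ((PySem.List.pyGet? newRow (x - 1)).getD 0))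
      ((List.replicate (p.length + 1) 0).set 0 1)
    = (List.range (j + 1)).map (pfx p) ++ List.replicate (p.length - j) 0 := by
  induction j with
  | zero =>
    rw [show ((0:ℕ):ℤ) + 1 = 1 from by norm_num]
    rw [show PySem.List.pyRange 1 1 = [] from by simp [PySem.List.pyRange]]
    obtain ⟨a, rest, rfl⟩ : ∃ a rest, p = a :: rest := by
      cases p with
      | nil => simp at hj
      | cons a rest => exact ⟨a, rest, rfl⟩
    simp only [List.getD, List.getElem?_cons_zero, Option.getD_some] at h0
    simp [List.replicate_succ, pfx, h0]
  | succ j ih =>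
    have hj' : j + 1 ≤ p.length := by omega
    have hb : (1:ℤ) ≤ (j:ℤ) + 1 := by omega
    rw [show ((j+1 : ℕ) : ℤ) + 1 = ((j:ℤ)+1) + 1 from by push_cast; ring]
    rw [PySem.List.pyRange_one_succ_right hb, List.foldl_append, ih hj']
    simp only [List.foldl_cons, List.foldl_nil]
    have hcond : ((j:ℤ) + 1) ≠ ((p.length : Int) + 1) - 1 := by
      omega
    rw [if_pos hcond]
    have e1 : ((j:ℤ)+1) = ((j+1 : ℕ) : ℤ) := by push_cast; ring
    rw [e1, PySem.List.pyGet?_natCast]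
    rw [show ((j+1 : ℕ) : ℤ) - 1 = ((j : ℕ) : ℤ) from by push_cast; ring, PySem.List.pyGet?_natCast]
    rw [Int.toNat_natCast]
    -- the state list: A ++ replicate (len - j) 0 with A of length j+1
    have hA : ((List.range (j + 1)).map (pfx p)).length = j + 1 := by simp
    have hget : ((List.range (j + 1)).map (pfx p) ++ List.replicate (p.length - j) 0)[(j:ℕ)]? = some (pfx p j) := by
      rw [List.getElem?_append_left (by simp)]
      simp
    rw [hget]
    have hrep : List.replicate (p.length - j) (0:Int) = 0 :: List.replicate (p.length - (j+1)) 0 := by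
      rw [show p.length - j = (p.length - (j+1)) + 1 from by omega, List.replicate_succ]
    rw [hrep, List.set_append, hA, if_neg (by omega), Nat.sub_self, List.set_cons_zero]
    have hv : (p[(j+1:ℕ)]?).getD 0 + pfx p j = pfx p (j + 1) := by
      rw [pfx_succ p j (by omega), List.getD_eq_getElem?_getD]; ring
    simp only [Option.getD_some]
    rw [hv]
    simp [List.range_succ]

theorem solveStep_eq (p : List Int) (hL : 1 ≤ p.length) (h0 : p.getD 0 0 = 1) :
    solveStep p = (List.range p.length).map (pfx p) ++ [p.sum] := by
  obtain ⟨t, ht⟩ : ∃ t, p.length = t + 1 := ⟨p.length - 1, by omega⟩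
  rw [solveStep]
  have hrange : PySem.List.pyRange 1 ((p.length : Int) + 1)
      = PySem.List.pyRange 1 ((t : Int) + 1) ++ [(p.length : Int)] := by
    rw [show ((p.length : Int) + 1) = ((p.length : Int)) + 1 from rfl]
    rw [PySem.List.pyRange_one_succ_right (by omega : (1:ℤ) ≤ (p.length : Int))]
    congr 1
    rw [ht]; push_cast; ring
  rw [hrange, List.foldl_append, inner_inv p h0 t (by omega)]
  simp only [List.foldl_cons, List.foldl_nil]
  rw [if_neg (by simp)]
  have hA : ((List.range (t + 1)).map (pfx p)).length = t + 1 := by simp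
  have hget : ((List.range (t + 1)).map (pfx p) ++ List.replicate (p.length - t) 0)[(t:ℕ)]? = some (pfx p t) := by
    rw [List.getElem?_append_left (by simp)]
    simp
  rw [show ((p.length : Int)) - 1 = ((t : ℕ) : ℤ) from by rw [ht]; push_cast; ring,
      PySem.List.pyGet?_natCast, hget]
  rw [show ((p.length : Int)).toNat = t + 1 from by omega]
  rw [show p.length - t = 1 from by omega]
  rw [List.set_append, hA, if_neg (by omega), Nat.sub_self]
  have hp : pfx p t = p.sum := by
    rw [pfx, ← ht, List.take_length]
  simp [hp, ht]

theorem outer_inv (m : ℕ) (hm : 1 ≤ m) :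
    (PySem.List.pyRange 0 (m : Int)).foldl (fun preRow _row => solveStep preRow) [1] = rowI m := by
  induction m with
  | zero => omega
  | succ m ih =>
    by_cases hm1 : m = 0
    · subst hm1
      rw [show ((1:ℕ) : ℤ) = 1 from rfl]
      rw [show PySem.List.pyRange 0 1 = [0] from by decide]
      simp only [List.foldl_cons, List.foldl_nil]
      rw [solveStep_eq [1] (by simp) (by simp)]
      simp [rowI, pfx, bal]
    · have hm' : 1 ≤ m := by omega
      rw [show ((m+1 : ℕ) : ℤ) = ((m:ℤ)) + 1 from by push_cast; ring]
      rw [PySem.List.pyRange_one_succ_right (by omega : (0:ℤ) ≤ (m:ℤ)), List.foldl_append, ih hm']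
      simp only [List.foldl_cons, List.foldl_nil]
      have hL : (rowI m).length = m + 1 := by simp [rowI]
      have h0 : (rowI m).getD 0 0 = 1 := by
        obtain ⟨s, rfl⟩ : ∃ s, m = s + 1 := ⟨m - 1, by omega⟩
        simp [rowI, List.range_succ_eq_map, bal]
      rw [solveStep_eq _ (by omega) h0, hL]
      obtain ⟨s, rfl⟩ : ∃ s, m = s + 1 := ⟨m - 1, by omega⟩
      have e2 : s + 1 + 1 = s + 2 := by omega
      have hrhs : rowI (s + 1 + 1) = (List.range (s + 1 + 1)).map (bal (s + 1 + 1)) ++ [bal (s + 2) (s + 1)] := by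
        rw [rowI, e2]; norm_num
      rw [hrhs]
      congr 1
      · apply List.map_congr_left
        intro i hi
        rw [List.mem_range] at hi
        by_cases him : i < s + 1
        · rw [pfx, rowI, List.take_append_of_le_length (by simp; omega)]
          rw [← List.map_take, List.take_range]
          rw [show min (i + 1) (s + 1) = i + 1 from by omega]
          rw [sum_range_bal (s + 1) i, e2]
        · have hieq : i = s + 1 := by omega
          subst hieq
          rw [pfx, show s + 1 + 1 = (rowI (s + 1)).length from by simp [rowI], List.take_length,
              hL, e2]
          exact rowI_sum s
      · rw [rowI_sum s]

theorem solve_eq_bal (s : ℕ) : solve ((s : Int) + 2) = bal (s + 2) (s + 1) := by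
  rw [solve]
  rw [show ((s : Int) + 2) - 1 = ((s + 1 : ℕ) : ℤ) from by push_cast; ring]
  rw [outer_inv (s + 1) (by omega)]
  exact rowI_sum s

theorem alt_inv (N k : ℕ) :
    (PySem.List.pyRange 1 ((k : Int) + 1)).foldl
      (fun b j => PySem.Int.floordiv (b * ((N : Int) + j)) j) 1
    = ((N + k).choose k : Int) := by
  induction k with
  | zero => simp [PySem.List.pyRange]
  | succ k ih =>
    have hb : (1:ℤ) ≤ (k:ℤ) + 1 := by omega
    rw [show ((k+1 : ℕ) : ℤ) + 1 = ((k:ℤ)+1) + 1 from by push_cast; ring]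
    rw [PySem.List.pyRange_one_succ_right hb, List.foldl_append, ih]
    simp only [List.foldl_cons, List.foldl_nil]
    have e1 : ((N+k).choose k : ℤ) * ((N:ℤ) + ((k:ℤ)+1)) = (((N+k+1).choose (k+1) * (k+1) : ℕ) : ℤ) := by
      have h := Nat.add_one_mul_choose_eq (N+k) k
      push_cast [← h]; ring
    rw [e1, show ((k:ℤ)+1) = ((k+1 : ℕ) : ℤ) from by push_cast; ring, PySem.Int.floordiv_natCast]
    rw [Nat.mul_div_cancel _ (by omega)]
    norm_cast

theorem alt_eq_catalan (N : ℕ) : solve_alt (N : Int) = (catalan N : Int) := by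
  rw [solve_alt]
  rw [alt_inv N N]
  have e : ((N:ℤ)+1) = ((N+1 : ℕ) : ℤ) := by push_cast; ring
  rw [e, PySem.Int.floordiv_natCast]
  have : (N+N).choose N = (N+1) * catalan N := by
    rw [succ_mul_catalan_eq_centralBinom]; simp [Nat.centralBinom, two_mul]
  rw [this, Nat.mul_div_cancel_left _ (by omega)]

-- ===== VERDICT (by name: the statement is the Claim_ definition above) =====
theorem solve_spec : Claim_equal_solve := by
  intro n _ hpre
  unfold Pre_solve at hpre
  unfold Spec_solve
  obtain ⟨s, rfl⟩ : ∃ s : ℕ, n = (s : Int) + 2 := ⟨(n - 2).toNat, by omega⟩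
  rw [solve_eq_bal, show ((s : Int) + 2) = ((s + 2 : ℕ) : Int) from by push_cast; ring,
      alt_eq_catalan, bal_eq_catalan]
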